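-- pv_equiv track=rewrite | github.com/rsanchezgarc/BIPSPI | trainAndTest/trainAndTest.py | getGroupsForMixedProtocol
-- ===== SOURCE A (Python) =====
-- def getGroupsForMixedProtocol(originalPrefixes):
--   i=0
--   groups_mixed=[]
--   groups_mixed_dict={}
--   for prefix in originalPrefixes:
--     if prefix[:-3] not in groups_mixed_dict:
--       groups_mixed_dict[prefix[:-3]]=i
--       groups_mixed.append(i)
--       i+=1
--     else:
--       groups_mixed.append(groups_mixed_dict[prefix[:-3]])
--   return groups_mixed
-- ===== SOURCE B (Python) =====
-- def getGroupsForMixedProtocol(originalPrefixes):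
--   keys = [p[:-3] for p in originalPrefixes]
--   return [len(set(keys[:keys.index(k)])) for k in keys]
-- ===== Notes on version B (the rewrite author's own statement) =====
-- stated objective: alternative
-- what changed: Replaces the incremental counter-plus-dict pass with a dict-free closed characterisation: each position's label is the number of distinct keys strictly before the first occurrence of its key, computed by list.index and a set over a prefix slice.
import Mathlib
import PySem

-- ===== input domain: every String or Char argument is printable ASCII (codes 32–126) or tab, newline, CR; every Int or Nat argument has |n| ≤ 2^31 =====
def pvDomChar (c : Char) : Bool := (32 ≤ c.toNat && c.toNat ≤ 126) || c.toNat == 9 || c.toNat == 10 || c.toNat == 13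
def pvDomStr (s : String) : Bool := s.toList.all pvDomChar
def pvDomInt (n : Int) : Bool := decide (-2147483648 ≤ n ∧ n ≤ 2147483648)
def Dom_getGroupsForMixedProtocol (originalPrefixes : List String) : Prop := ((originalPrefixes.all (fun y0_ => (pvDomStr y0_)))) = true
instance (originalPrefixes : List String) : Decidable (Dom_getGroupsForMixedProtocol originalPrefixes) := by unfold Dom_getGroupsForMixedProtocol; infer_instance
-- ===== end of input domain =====

-- B replaces A's incremental counter/dict pass with a dict-free characterisation: each label is
-- the number of distinct keys strictly before the first occurrence of its key (objective: alternative).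


-- ===== PORT A =====
-- state: (i, groups_mixed, groups_mixed_dict); `groups_mixed_dict[prefix[:-3]]` in the else branch
-- is ported as getD _ 0 — the key is always present there, so this is exact.
def getGroupsForMixedProtocol (originalPrefixes : List String) : List Int :=
  (originalPrefixes.foldl
    (fun (st : Int × List Int × PySem.Dict String Int) prefix_ =>
      if !st.2.2.contains (PySem.Str.slice prefix_ none (some (-3))) then
        (st.1 + 1, st.2.1 ++ [st.1], st.2.2.insert (PySem.Str.slice prefix_ none (some (-3))) st.1)
      else
        (st.1, st.2.1 ++ [st.2.2.getD (PySem.Str.slice prefix_ none (some (-3))) 0], st.2.2))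
    (0, ([], PySem.Dict.empty))).2.1

-- ===== PORT B =====
-- keys.index(k) never raises here (k is drawn from keys), so index? … |>.getD 0 is exact.
def getGroupsForMixedProtocol_alt (originalPrefixes : List String) : List Int :=
  let keys := originalPrefixes.map (fun p => PySem.Str.slice p none (some (-3)))
  keys.map (fun k =>
    (((PySem.Set.ofList (PySem.List.slice keys none
        (some ((((PySem.List.index? keys k).getD 0 : Nat) : Int))))).length : Nat) : Int))

-- ===== PRECONDITION & SPEC =====
def Spec_getGroupsForMixedProtocol (originalPrefixes : List String) (out : List Int) : Prop := out = getGroupsForMixedProtocol_alt originalPrefixes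
instance (originalPrefixes : List String) (out : List Int) : Decidable (Spec_getGroupsForMixedProtocol originalPrefixes out) := by unfold Spec_getGroupsForMixedProtocol; infer_instance

-- ===== CLAIM (what is proved, stated in full; the proofs are below) =====
def Claim_equal_getGroupsForMixedProtocol : Prop := ∀ (originalPrefixes : List String), Dom_getGroupsForMixedProtocol originalPrefixes → Spec_getGroupsForMixedProtocol originalPrefixes (getGroupsForMixedProtocol originalPrefixes)

-- ===== LEMMAS AND PROOFS =====

-- PySem.Set.update only appends to the seen-set
lemma update_eq_append (l s : List String) : ∃ r, PySem.Set.update s l = s ++ r := by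
  induction l generalizing s with
  | nil => exact ⟨[], by simp [PySem.Set.update]⟩
  | cons x t ih =>
    have hstep : PySem.Set.update s (x :: t) = PySem.Set.update (PySem.Set.add s x) t := rfl
    by_cases h : x ∈ s
    · obtain ⟨r, hr⟩ := ih s
      have hadd : PySem.Set.add s x = s := by
        simp [PySem.Set.add, PySem.Set.contains, h]
      exact ⟨r, by rw [hstep, hadd]; exact hr⟩
    · obtain ⟨r, hr⟩ := ih (s ++ [x])
      refine ⟨x :: r, ?_⟩
      have hadd : PySem.Set.add s x = s ++ [x] := by
        simp [PySem.Set.add, PySem.Set.contains, h]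
      calc PySem.Set.update s (x :: t) = PySem.Set.update (s ++ [x]) t := by rw [hstep, hadd]
        _ = s ++ [x] ++ r := hr
        _ = s ++ (x :: r) := by simp

lemma index?_update_of_mem {k : String} {s : List String} (l : List String) (h : k ∈ s) :
    PySem.List.index? (PySem.Set.update s l) k = PySem.List.index? s k := by
  obtain ⟨r, hr⟩ := update_eq_append l s
  rw [hr, PySem.List.index?_append_of_mem r h]

-- what A's loop appends: the index of each key in the final first-occurrence table
lemma aLoop (key : String → String) (l : List String) :
    ∀ (s : List String) (d : PySem.Dict String Int) (out : List Int),
    s.Nodup →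
    (∀ j, d.get? j = (PySem.List.index? s j).map (fun n => ((n : Nat) : Int))) →
    (l.foldl
      (fun (st : Int × List Int × PySem.Dict String Int) p =>
        if !st.2.2.contains (key p) then
          (st.1 + 1, st.2.1 ++ [st.1], st.2.2.insert (key p) st.1)
        else
          (st.1, st.2.1 ++ [st.2.2.getD (key p) 0], st.2.2))
      ((s.length : Int), out, d)).2.1
    = out ++ l.map (fun p =>
        (((PySem.List.index? (PySem.Set.update s (l.map key)) (key p)).getD 0 : Nat) : Int)) := by
  induction l with
  | nil => intro s d out _ _; simp
  | cons p t ih =>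
    intro s d out hnd hd
    by_cases hmem : key p ∈ s
    · -- seen before: else branch
      obtain ⟨n, hn⟩ : ∃ n, PySem.List.index? s (key p) = some n :=
        Option.isSome_iff_exists.mp ((PySem.List.index?_isSome_iff _ _).mpr hmem)
      have hcont : d.contains (key p) = true := by
        rw [PySem.Dict.contains_eq_isSome_get?, hd, hn]; rfl
      have hget : d.getD (key p) 0 = ((n : Nat) : Int) := by
        rw [PySem.Dict.getD_eq_get?_getD, hd, hn]; rfl
      have hupd : PySem.Set.update s (List.map key (p :: t)) = PySem.Set.update s (t.map key) := by
        simp [PySem.Set.update, PySem.Set.add, PySem.Set.contains, hmem]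
      simp only [List.foldl_cons, hcont, hget, Bool.not_true, Bool.false_eq_true, if_false]
      rw [ih s d (out ++ [((n : Nat) : Int)]) hnd hd, hupd]
      simp only [List.map_cons]
      rw [index?_update_of_mem (t.map key) hmem, hn]
      simp
    · -- new key: then branch
      have hnone : PySem.List.index? s (key p) = none :=
        (PySem.List.index?_eq_none_iff _ _).mpr hmem
      have hcont : d.contains (key p) = false := by
        rw [PySem.Dict.contains_eq_isSome_get?, hd, hnone]; rfl
      have hupd : PySem.Set.update s (List.map key (p :: t)) =
          PySem.Set.update (s ++ [key p]) (t.map key) := by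
        simp [PySem.Set.update, PySem.Set.add, PySem.Set.contains, hmem]
      have hnd' : (s ++ [key p]).Nodup := by
        apply List.Nodup.append hnd (List.nodup_singleton _)
        intro a ha hb
        simp only [List.mem_singleton] at hb
        exact hmem (hb ▸ ha)
      have hd' : ∀ j, (d.insert (key p) (s.length : Int)).get? j
          = (PySem.List.index? (s ++ [key p]) j).map (fun n => ((n : Nat) : Int)) := by
        intro j
        by_cases hj : j = key p
        · subst hj
          rw [PySem.Dict.get?_insert_self, PySem.List.index?_append_singleton_self s (key p) hmem]
          rfl
        · rw [PySem.Dict.get?_insert_of_ne _ _ hj, hd]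
          by_cases hjs : j ∈ s
          · rw [PySem.List.index?_append_of_mem [key p] hjs]
          · rw [(PySem.List.index?_eq_none_iff _ _).mpr hjs,
              (PySem.List.index?_eq_none_iff _ _).mpr (by simp [hjs, hj])]
      have hlen : ((s.length : Int) + 1) = (((s ++ [key p]).length : Nat) : Int) := by
        simp
      simp only [List.foldl_cons, hcont, Bool.not_false, if_true, hlen]
      rw [ih (s ++ [key p]) _ (out ++ [(s.length : Int)]) hnd' hd', hupd]
      have hidx : PySem.List.index? (PySem.Set.update (s ++ [key p]) (t.map key)) (key p)
          = some s.length := by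
        rw [index?_update_of_mem (t.map key) (by simp),
          PySem.List.index?_append_singleton_self s (key p) hmem]
      simp only [List.map_cons]
      rw [hidx]
      simp

-- the first-occurrence index in the dedup table is the number of distinct earlier keys
lemma index?_update_take (l : List String) :
    ∀ (k : String) (j : Nat) (s : List String), k ∉ s →
    PySem.List.index? l k = some j →
    PySem.List.index? (PySem.Set.update s l) k = some ((PySem.Set.update s (l.take j)).length) := by
  induction l with
  | nil => intro k j s _ h; simp [PySem.List.index?_eq_idxOf?] at h
  | cons x t ih =>
    intro k j s hks hidx
    by_cases hxk : x = k
    · subst hxk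
      have hj : j = 0 := by
        rw [PySem.List.index?_cons_self] at hidx
        exact (Option.some_injective _ hidx.symm)
      subst hj
      have hstep : PySem.Set.update s (x :: t) = PySem.Set.update (s ++ [x]) t := by
        simp [PySem.Set.update, PySem.Set.add, PySem.Set.contains, hks]
      rw [hstep, List.take_zero, index?_update_of_mem t (by simp),
        PySem.List.index?_append_singleton_self s x hks]
      rfl
    · rw [PySem.List.index?_cons_of_ne t hxk] at hidx
      obtain ⟨j', hj', hjeq⟩ := Option.map_eq_some_iff.mp hidx
      have hstep : ∀ u, PySem.Set.update s (x :: u) = PySem.Set.update (PySem.Set.add s x) u :=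
        fun u => rfl
      have hks' : k ∉ PySem.Set.add s x := by
        intro h
        rcases (PySem.Set.mem_add _ _ _).mp h with h' | h'
        · exact hks h'
        · exact hxk h'.symm
      have htake : (x :: t).take j = x :: t.take j' := by
        rw [← hjeq]; rfl
      rw [htake, hstep, hstep, ih k j' (PySem.Set.add s x) hks' hj']

-- ===== VERDICT (by name: the statement is the Claim_ definition above) =====
theorem getGroupsForMixedProtocol_spec : Claim_equal_getGroupsForMixedProtocol := by
  intro originalPrefixes _
  unfold Spec_getGroupsForMixedProtocol getGroupsForMixedProtocol
  simp only [getGroupsForMixedProtocol_alt]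
  have h := aLoop (fun p => PySem.Str.slice p none (some (-3))) originalPrefixes []
    PySem.Dict.empty [] (by simp) (by intro j; simp [PySem.Dict.get?_empty, PySem.List.index?])
  simp only [List.length_nil, Nat.cast_zero, List.nil_append] at h
  rw [h, List.map_map]
  apply List.map_congr_left
  intro p hp
  simp only [Function.comp]
  set keys := originalPrefixes.map (fun p => PySem.Str.slice p none (some (-3))) with hkeys
  have hk : PySem.Str.slice p none (some (-3)) ∈ keys := List.mem_map.mpr ⟨p, hp, rfl⟩
  obtain ⟨j, hj⟩ : ∃ j, PySem.List.index? keys (PySem.Str.slice p none (some (-3))) = some j :=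
    Option.isSome_iff_exists.mp ((PySem.List.index?_isSome_iff _ _).mpr hk)
  have hidx := index?_update_take keys (PySem.Str.slice p none (some (-3))) j []
    (by simp) hj
  rw [hidx, hj]
  have hsl : PySem.List.slice keys none (some ((j : Nat) : Int)) = keys.take j :=
    PySem.List.slice_to_natCast keys j
  simp only [Option.getD_some, hsl]
  rw [show PySem.Set.update ([] : List String) (keys.take j)
      = PySem.Set.ofList (keys.take j) from rfl]
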